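-- pv_equiv track=rewrite | github.com/Khamel83/atlas | helpers/article_strategies.py | is_likely_paywall
-- ===== SOURCE A (Python) =====
-- PAYWALL_PHRASES = [
--     "subscribe to continue",
--     "create a free account",
--     "sign in to read",
--     "unlock this story",
--     "your free articles",
--     "to continue reading",
--     "subscribe now",
--     "subscription required",
--     "premium content",
--     "members only",
--     "register to continue",
--     "paid subscribers only",
--     "subscribe for full access",
--     "subscribe for unlimited access",
--     "login to read more",
--     "create an account to continue",
--     "please enable js",
--     "please enable javascript",
--     "disable any ad blocker",
--     "javascript is disabled",
--     "javascript required",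
--     "enable javascript",
--     "this site requires javascript",
--     "javascript must be enabled",
-- ]
--
-- def is_likely_paywall(html_content: str, log_path: str = "") -> bool:
--     # Minimal check for test compatibility: keyword or very short content
--     if not html_content:
--         return False
--     text = html_content.lower()
--     if any(phrase in text for phrase in PAYWALL_PHRASES):
--         return True
--     if len(text) < 10 or len(text.split()) < 5:
--         return True
--     return False
-- ===== SOURCE B (Python) =====
-- PAYWALL_PHRASES = [
--     "subscribe to continue",
--     "create a free account",
--     "sign in to read",
--     "unlock this story",
--     "your free articles",
--     "to continue reading",
--     "subscribe now",
--     "subscription required",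
--     "premium content",
--     "members only",
--     "register to continue",
--     "paid subscribers only",
--     "subscribe for full access",
--     "subscribe for unlimited access",
--     "login to read more",
--     "create an account to continue",
--     "please enable js",
--     "please enable javascript",
--     "disable any ad blocker",
--     "javascript is disabled",
--     "javascript required",
--     "enable javascript",
--     "this site requires javascript",
--     "javascript must be enabled",
-- ]
--
-- def is_likely_paywall(html_content: str, log_path: str = "") -> bool:
--     # Single left-to-right scan: at each position test every phrase as a prefix,
--     # instead of 24 independent substring searches over the whole text.
--     if not html_content:
--         return False
--     text = html_content.lower()
--     for i in range(len(text)):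
--         for phrase in PAYWALL_PHRASES:
--             if text.startswith(phrase, i):
--                 return True
--     if len(text) < 10 or len(text.split()) < 5:
--         return True
--     return False
-- ===== Notes on version B (the rewrite author's own statement) =====
-- stated objective: alternative
-- what changed: Replaces the 24 independent per-phrase substring searches over the whole text with a single left-to-right scan that tests every phrase as a prefix at each position (one multi-pattern pass over the text); the empty-content and length/word-count guards are unchanged. Note B is slower in CPython at large sizes (Python-level loop vs C substring search).
import Mathlib
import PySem

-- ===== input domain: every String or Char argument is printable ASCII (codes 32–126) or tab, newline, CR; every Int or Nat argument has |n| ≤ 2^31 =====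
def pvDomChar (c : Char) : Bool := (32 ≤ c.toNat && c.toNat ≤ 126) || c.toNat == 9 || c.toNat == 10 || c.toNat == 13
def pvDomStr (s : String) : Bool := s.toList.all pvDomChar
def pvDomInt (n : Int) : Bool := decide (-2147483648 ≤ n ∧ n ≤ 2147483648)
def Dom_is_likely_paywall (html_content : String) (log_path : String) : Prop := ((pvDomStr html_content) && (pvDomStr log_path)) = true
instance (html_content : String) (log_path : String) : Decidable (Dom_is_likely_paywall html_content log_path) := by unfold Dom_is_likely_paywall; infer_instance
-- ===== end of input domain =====

-- ===== PORT A =====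
-- B replaces 24 per-phrase substring searches with one left-to-right scan testing all
-- phrases as prefixes at each position (alternative algorithm; return value only, no side effects).
def pvPhrases : List String := [
  "subscribe to continue", "create a free account", "sign in to read",
  "unlock this story", "your free articles", "to continue reading",
  "subscribe now", "subscription required", "premium content", "members only",
  "register to continue", "paid subscribers only", "subscribe for full access",
  "subscribe for unlimited access", "login to read more",
  "create an account to continue", "please enable js", "please enable javascript",
  "disable any ad blocker", "javascript is disabled", "javascript required",
  "enable javascript", "this site requires javascript", "javascript must be enabled"]

def is_likely_paywall (html_content : String) (log_path : String) : Bool :=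
  if html_content.toList.isEmpty then false
  else
    let text := PySem.Str.lower html_content
    if pvPhrases.any (fun phrase => PySem.Str.isIn phrase text) then true
    else if PySem.Str.len text < 10 || (PySem.Str.split₀ text).length < 5 then true
    else false

-- ===== PORT B =====
def pvPhrasesChars : List (List Char) := pvPhrases.map String.toList

-- the 'for i in range(len(text))' loop of Source B, as recursion over the suffixes of text
def pvScan : List Char → Bool
  | [] => false
  | c :: t => pvPhrasesChars.any (fun phrase => phrase.isPrefixOf (c :: t)) || pvScan t

def is_likely_paywall_alt (html_content : String) (log_path : String) : Bool :=
  if html_content.toList.isEmpty then false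
  else
    let text := (PySem.Str.lower html_content).toList
    if pvScan text then true
    else if text.length < 10 || (PySem.Chars.split₀ text).length < 5 then true
    else false

-- ===== PRECONDITION & SPEC =====
def Spec_is_likely_paywall (html_content : String) (log_path : String) (out : Bool) : Prop := out = is_likely_paywall_alt html_content log_path
instance (html_content : String) (log_path : String) (out : Bool) : Decidable (Spec_is_likely_paywall html_content log_path out) := by unfold Spec_is_likely_paywall; infer_instance

-- ===== CLAIM (what is proved, stated in full; the proofs are below) =====
def Claim_equal_is_likely_paywall : Prop := ∀ (html_content : String) (log_path : String), Dom_is_likely_paywall html_content log_path → Spec_is_likely_paywall html_content log_path (is_likely_paywall html_content log_path)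

-- ===== LEMMAS AND PROOFS =====
lemma pvScan_eq_any (cs : List Char) :
    pvScan cs = pvPhrasesChars.any (fun phrase => PySem.Chars.isIn phrase cs) := by
  induction cs with
  | nil => decide
  | cons c t ih =>
    rw [Bool.eq_iff_iff]
    simp only [pvScan, Bool.or_eq_true, List.any_eq_true, ih,
      List.isPrefixOf_iff_prefix, PySem.Chars.isIn_iff_infix, List.infix_cons_iff]
    constructor
    · rintro (⟨p, hp, h⟩ | ⟨p, hp, h⟩)
      · exact ⟨p, hp, Or.inl h⟩
      · exact ⟨p, hp, Or.inr h⟩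
    · rintro ⟨p, hp, h | h⟩
      · exact Or.inl ⟨p, hp, h⟩
      · exact Or.inr ⟨p, hp, h⟩

-- ===== VERDICT (by name: the statement is the Claim_ definition above) =====
theorem is_likely_paywall_spec : Claim_equal_is_likely_paywall := by
  intro html_content log_path _
  unfold Spec_is_likely_paywall is_likely_paywall is_likely_paywall_alt
  simp only [pvScan_eq_any, pvPhrasesChars, List.any_map, Function.comp_def,
    PySem.Str.isIn_eq, PySem.Str.len_eq]
  rw [← PySem.Str.split₀_map_toList, List.length_map]
  norm_num
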